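-- pv_equiv track=rewrite | github.com/DavidCho1999/codevault | pipeline/_experiments/table_tools/table_smart_convert.py | calculate_rowspans
-- ===== SOURCE A (Python) =====
-- from typing import List, Optional, Tuple
--
-- def calculate_rowspans(data: List[List], col_idx: int, start_row: int, end_row: int) -> List[int]:
--     """
--     특정 열에서 rowspan 계산
--     반환: 각 행의 rowspan 값 (0이면 이전 셀의 rowspan에 포함됨)
--     """
--     rowspans = []
--
--     i = start_row
--     while i <= end_row:
--         cell = data[i][col_idx] if col_idx < len(data[i]) else None
--         cell_str = str(cell).strip() if cell else ''
--
--         # 연속된 동일 값 찾기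
--         span = 1
--         j = i + 1
--         while j <= end_row:
--             next_cell = data[j][col_idx] if col_idx < len(data[j]) else None
--             next_str = str(next_cell).strip() if next_cell else ''
--
--             if cell_str and cell_str == next_str:
--                 span += 1
--                 j += 1
--             else:
--                 break
--
--         rowspans.append(span)
--         for _ in range(span - 1):
--             rowspans.append(0)  # 0 = 이 셀은 렌더링하지 않음
--
--         i += span
--
--     return rowspans
-- ===== SOURCE B (Python) =====
-- def calculate_rowspans(data, col_idx, start_row, end_row):
--     # Single forward pass: keep the index and text of the current anchor cell;
--     # a matching non-empty row bumps the anchor's span and emits 0, otherwise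
--     # the row becomes the new anchor with span 1.
--     rowspans = []
--     anchor_idx = -1
--     anchor_str = ''
--     for r in range(start_row, end_row + 1):
--         row = data[r]
--         cell = row[col_idx] if col_idx < len(row) else None
--         s = str(cell).strip() if cell else ''
--         if anchor_str and s == anchor_str:
--             rowspans[anchor_idx] += 1
--             rowspans.append(0)
--         else:
--             anchor_idx = len(rowspans)
--             anchor_str = s
--             rowspans.append(1)
--     return rowspans
-- ===== Notes on version B (the rewrite author's own statement) =====
-- stated objective: alternative
-- what changed: Replaced A's restartable outer while-loop with a nested look-ahead scan per anchor by one single forward pass over the row range that keeps the current anchor's index and string and increments its span in place.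
import Mathlib
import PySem

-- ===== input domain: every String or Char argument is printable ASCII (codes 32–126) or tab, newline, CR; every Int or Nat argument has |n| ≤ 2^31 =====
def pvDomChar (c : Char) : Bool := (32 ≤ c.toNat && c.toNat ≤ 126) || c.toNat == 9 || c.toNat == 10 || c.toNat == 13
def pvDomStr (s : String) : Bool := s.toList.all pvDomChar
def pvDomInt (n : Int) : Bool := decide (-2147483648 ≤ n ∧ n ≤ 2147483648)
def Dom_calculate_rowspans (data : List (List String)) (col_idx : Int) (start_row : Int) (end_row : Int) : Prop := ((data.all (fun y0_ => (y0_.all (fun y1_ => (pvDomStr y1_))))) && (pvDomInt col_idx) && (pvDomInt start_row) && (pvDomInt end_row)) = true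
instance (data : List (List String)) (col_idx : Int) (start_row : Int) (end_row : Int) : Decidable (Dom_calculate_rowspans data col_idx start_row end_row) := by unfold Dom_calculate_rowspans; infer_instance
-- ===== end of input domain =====

-- B replaces A's anchor-plus-look-ahead nested loops by one forward pass that
-- tracks the current anchor cell and bumps its span in place (alternative
-- decomposition; same asymptotic cost).

-- ===== PORT A =====
-- shared by both ports: both Pythons contain the identical normalization
-- `cell = data[i][col_idx] if col_idx < len(data[i]) else None;
--  s = str(cell).strip() if cell else ''`
def pvCellStr (data : List (List String)) (col_idx i : Int) : String :=
  let row := (PySem.List.pyGet? data i).getD []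
  let cell : Option String := if col_idx < (row.length : Int) then PySem.List.pyGet? row col_idx else none
  match cell with
  | some s => if s = "" then "" else PySem.Str.strip s
  | none => ""

-- inner `while j <= end_row: … else break` of A, accumulator `span`
def pvInnerA (data : List (List String)) (col_idx end_row : Int) (cs : String) (j span : Int) : Nat → Int
  | 0 => span
  | fuel + 1 =>
    if j ≤ end_row then
      let ns := pvCellStr data col_idx j
      if cs ≠ "" ∧ cs = ns then pvInnerA data col_idx end_row cs (j + 1) (span + 1) fuel
      else span
    else span

-- outer `while i <= end_row` of A, accumulator `rowspans`
def pvOuterA (data : List (List String)) (col_idx end_row : Int) (i : Int) (acc : List Int) : Nat → List Int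
  | 0 => acc
  | fuel + 1 =>
    if i ≤ end_row then
      let cs := pvCellStr data col_idx i
      let span := pvInnerA data col_idx end_row cs (i + 1) 1 (end_row - i).toNat
      pvOuterA data col_idx end_row (i + span) (acc ++ span :: List.replicate (span - 1).toNat 0) fuel
    else acc

def calculate_rowspans (data : List (List String)) (col_idx : Int) (start_row : Int) (end_row : Int) : List Int :=
  pvOuterA data col_idx end_row start_row [] (end_row + 1 - start_row).toNat

-- ===== PORT B =====
-- one iteration of B's single `for r in range(start_row, end_row+1)` loop
def pvStepB (data : List (List String)) (col_idx : Int) (st : List Int × Int × String) (r : Int) : List Int × Int × String :=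
  let rowspans := st.1
  let anchor_idx := st.2.1
  let anchor_str := st.2.2
  let s := pvCellStr data col_idx r
  if anchor_str ≠ "" ∧ s = anchor_str then
    (rowspans.modify anchor_idx.toNat (· + 1) ++ [0], anchor_idx, anchor_str)
  else
    (rowspans ++ [1], (rowspans.length : Int), s)

def calculate_rowspans_alt (data : List (List String)) (col_idx : Int) (start_row : Int) (end_row : Int) : List Int :=
  ((PySem.List.pyRange start_row (end_row + 1) 1).foldl (pvStepB data col_idx) ([], -1, "")).1

-- ===== PRECONDITION & SPEC =====
-- Pre_ excludes exactly the inputs where Python A raises an IndexError: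
-- some visited row index in [start_row, end_row] is out of range for data,
-- or col_idx < len(row) holds but col_idx < -len(row) (negative wraparound fails).
-- (the quantified range is clamped to [-len(data), len(data)), which equals the
-- visited range whenever the bounds conjunct holds, so this is the same condition
-- but decides quickly even for huge start_row/end_row)
def Pre_calculate_rowspans (data : List (List String)) (col_idx : Int) (start_row : Int) (end_row : Int) : Prop :=
  (start_row ≤ end_row → (-(data.length : Int) ≤ start_row ∧ end_row < (data.length : Int))) ∧
  ∀ i ∈ PySem.List.pyRange (max start_row (-(data.length : Int))) (min (end_row + 1) (data.length : Int)) 1,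
    (PySem.List.pyGet? data i).isSome = true ∧
    (col_idx < (((PySem.List.pyGet? data i).getD []).length : Int) →
      (PySem.List.pyGet? ((PySem.List.pyGet? data i).getD []) col_idx).isSome = true)
instance (data : List (List String)) (col_idx : Int) (start_row : Int) (end_row : Int) : Decidable (Pre_calculate_rowspans data col_idx start_row end_row) := by unfold Pre_calculate_rowspans; infer_instance

def pvWitness_calculate_rowspans : List (List String) × Int × Int × Int := ([["a"], ["a"], ["b"]], 0, 0, 2)

def Spec_calculate_rowspans (data : List (List String)) (col_idx : Int) (start_row : Int) (end_row : Int) (out : List Int) : Prop := out = calculate_rowspans_alt data col_idx start_row end_row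
instance (data : List (List String)) (col_idx : Int) (start_row : Int) (end_row : Int) (out : List Int) : Decidable (Spec_calculate_rowspans data col_idx start_row end_row out) := by unfold Spec_calculate_rowspans; infer_instance

-- ===== CLAIM (what is proved, stated in full; the proofs are below) =====
def Claim_equal_calculate_rowspans : Prop := ∀ (data : List (List String)) (col_idx : Int) (start_row : Int) (end_row : Int), Dom_calculate_rowspans data col_idx start_row end_row → Pre_calculate_rowspans data col_idx start_row end_row → Spec_calculate_rowspans data col_idx start_row end_row (calculate_rowspans data col_idx start_row end_row)

-- ===== LEMMAS AND PROOFS =====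

-- the inner while-loop's accumulator is additive
theorem pvInnerA_acc (data : List (List String)) (col_idx end_row : Int) (cs : String) :
    ∀ (fuel : Nat) (j span : Int),
      pvInnerA data col_idx end_row cs j span fuel = span + pvInnerA data col_idx end_row cs j 0 fuel := by
  intro fuel
  induction fuel with
  | zero => intro j span; simp [pvInnerA]
  | succ f ih =>
    intro j span
    simp only [pvInnerA]
    split_ifs with h1 h2
    · rw [ih (j + 1) (span + 1), ih (j + 1) (0 + 1)]; ring
    · simp
    · simp

theorem pvInnerA_zero_nonneg (data : List (List String)) (col_idx end_row : Int) (cs : String) :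
    ∀ (fuel : Nat) (j : Int), 0 ≤ pvInnerA data col_idx end_row cs j 0 fuel := by
  intro fuel
  induction fuel with
  | zero => intro j; simp [pvInnerA]
  | succ f ih =>
    intro j
    simp only [pvInnerA]
    split_ifs with h1 h2
    · rw [pvInnerA_acc]; have := ih (j + 1); omega
    · omega
    · omega

theorem pvModify_append (f : Int → Int) : ∀ (acc : List Int) (c : Int) (zs : List Int),
    (acc ++ c :: zs).modify acc.length f = acc ++ f c :: zs := by
  intro acc
  induction acc with
  | nil => intro c zs; simp [List.modify]
  | cons a as ih => intro c zs; simpa [List.modify] using ih c zs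

-- the outer accumulator is a prefix
theorem pvOuterA_acc (data : List (List String)) (col_idx end_row : Int) :
    ∀ (fuel : Nat) (i : Int) (acc : List Int),
      pvOuterA data col_idx end_row i acc fuel = acc ++ pvOuterA data col_idx end_row i [] fuel := by
  intro fuel
  induction fuel with
  | zero => intro i acc; simp [pvOuterA]
  | succ f ih =>
    intro i acc
    simp only [pvOuterA]
    split_ifs with h1
    · conv_lhs => rw [ih]
      conv_rhs => rw [ih]
      simp
    · simp

-- fuel irrelevance for the outer loop above the natural bound
theorem pvOuterA_fuel (data : List (List String)) (col_idx end_row : Int) :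
    ∀ (f1 f2 : Nat) (i : Int) (acc : List Int),
      (end_row + 1 - i).toNat ≤ f1 → (end_row + 1 - i).toNat ≤ f2 →
      pvOuterA data col_idx end_row i acc f1 = pvOuterA data col_idx end_row i acc f2 := by
  intro f1
  induction f1 with
  | zero =>
    intro f2 i acc h1 h2
    have hi : ¬ i ≤ end_row := by omega
    cases f2 with
    | zero => rfl
    | succ f => simp [pvOuterA, hi]
  | succ f ih =>
    intro f2 i acc h1 h2
    cases f2 with
    | zero =>
      have hi : ¬ i ≤ end_row := by omega
      simp [pvOuterA, hi]
    | succ f2' =>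
      simp only [pvOuterA]
      split_ifs with hi
      · have hspan : 1 ≤ pvInnerA data col_idx end_row (pvCellStr data col_idx i) (i + 1) 1 (end_row - i).toNat := by
          rw [pvInnerA_acc]
          have := pvInnerA_zero_nonneg data col_idx end_row (pvCellStr data col_idx i) (end_row - i).toNat (i + 1)
          omega
        exact ih f2' _ _ (by omega) (by omega)
      · rfl


-- one unfolding of A's outer loop, with the recursive fuel renormalized
theorem pvOuterA_unfold (data : List (List String)) (col_idx end_row : Int) (j : Int) (g' : Nat)
    (hj : j ≤ end_row) (hg : (end_row - j).toNat = g') :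
    pvOuterA data col_idx end_row j [] (g' + 1)
      = (1 + pvInnerA data col_idx end_row (pvCellStr data col_idx j) (j + 1) 0 g')
          :: (List.replicate (pvInnerA data col_idx end_row (pvCellStr data col_idx j) (j + 1) 0 g').toNat 0
              ++ pvOuterA data col_idx end_row
                   (j + 1 + pvInnerA data col_idx end_row (pvCellStr data col_idx j) (j + 1) 0 g') []
                   (end_row + 1 - (j + 1 + pvInnerA data col_idx end_row (pvCellStr data col_idx j) (j + 1) 0 g')).toNat) := by
  have hm' := pvInnerA_zero_nonneg data col_idx end_row (pvCellStr data col_idx j) g' (j + 1)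
  simp only [pvOuterA]
  rw [if_pos hj, hg, pvInnerA_acc data col_idx end_row (pvCellStr data col_idx j) g' (j + 1) 1,
      pvOuterA_acc]
  have h4 : (1 + pvInnerA data col_idx end_row (pvCellStr data col_idx j) (j + 1) 0 g' - 1).toNat
      = (pvInnerA data col_idx end_row (pvCellStr data col_idx j) (j + 1) 0 g').toNat := by omega
  have h5 : j + (1 + pvInnerA data col_idx end_row (pvCellStr data col_idx j) (j + 1) 0 g')
      = j + 1 + pvInnerA data col_idx end_row (pvCellStr data col_idx j) (j + 1) 0 g' := by ring
  rw [h4, h5, pvOuterA_fuel data col_idx end_row g'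
        (end_row + 1 - (j + 1 + pvInnerA data col_idx end_row (pvCellStr data col_idx j) (j + 1) 0 g')).toNat
        (j + 1 + pvInnerA data col_idx end_row (pvCellStr data col_idx j) (j + 1) 0 g') [] (by omega) (by omega)]
  simp

-- MAIN: B's fold over [j, end_row+1), started just after an anchor append, equals
-- "bump the anchor by the run length, pad zeros, then A's loop from past the run".
theorem pvMain (data : List (List String)) (col_idx end_row : Int) :
    ∀ (g : Nat) (j : Int) (acc : List Int) (c : Int) (zs : List Int) (cs : String),
      (end_row + 1 - j).toNat = g →
      ((PySem.List.pyRange j (end_row + 1) 1).foldl (pvStepB data col_idx) (acc ++ c :: zs, (acc.length : Int), cs)).1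
        = acc ++ (c + pvInnerA data col_idx end_row cs j 0 g)
            :: (zs ++ List.replicate (pvInnerA data col_idx end_row cs j 0 g).toNat 0
                ++ pvOuterA data col_idx end_row (j + pvInnerA data col_idx end_row cs j 0 g) []
                     (end_row + 1 - (j + pvInnerA data col_idx end_row cs j 0 g)).toNat) := by
  intro g
  induction g with
  | zero =>
    intro j acc c zs cs hg
    have hj : end_row + 1 ≤ j := by omega
    rw [PySem.List.pyRange_one_eq_nil hj]
    simp [pvInnerA, pvOuterA, hg]
  | succ g' ih =>
    intro j acc c zs cs hg
    have hj : j ≤ end_row := by omega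
    have hj' : j < end_row + 1 := by omega
    rw [PySem.List.pyRange_one_cons hj']
    simp only [List.foldl_cons]
    by_cases h : cs ≠ "" ∧ pvCellStr data col_idx j = cs
    · -- the row merges into the current anchor
      have hstep : pvStepB data col_idx (acc ++ c :: zs, (acc.length : Int), cs) j
          = (acc ++ (c + 1) :: (zs ++ [0]), (acc.length : Int), cs) := by
        simp only [pvStepB]
        rw [if_pos h, Int.toNat_natCast, pvModify_append]
        simp
      rw [hstep, ih (j + 1) acc (c + 1) (zs ++ [0]) cs (by omega)]
      have hm' := pvInnerA_zero_nonneg data col_idx end_row cs g' (j + 1)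
      have hin : pvInnerA data col_idx end_row cs j 0 (g' + 1)
          = 1 + pvInnerA data col_idx end_row cs (j + 1) 0 g' := by
        simp only [pvInnerA]
        rw [if_pos hj, if_pos ⟨h.1, h.2.symm⟩, pvInnerA_acc]
        omega
      rw [hin]
      set m' := pvInnerA data col_idx end_row cs (j + 1) 0 g' with hm
      have h1 : c + 1 + m' = c + (1 + m') := by ring
      have h2 : (1 + m').toNat = m'.toNat + 1 := by omega
      have h3 : j + 1 + m' = j + (1 + m') := by ring
      rw [h1, h2, h3, List.replicate_succ]
      simp [List.append_assoc]
    · -- the row starts a new anchor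
      have hstep : pvStepB data col_idx (acc ++ c :: zs, (acc.length : Int), cs) j
          = ((acc ++ c :: zs) ++ [1], (((acc ++ c :: zs).length : Nat) : Int), pvCellStr data col_idx j) := by
        have h' : ¬ (cs ≠ "" ∧ pvCellStr data col_idx j = cs) := h
        simp only [pvStepB]
        rw [if_neg h']
      rw [hstep, ih (j + 1) (acc ++ c :: zs) 1 [] (pvCellStr data col_idx j) (by omega)]
      have hin : pvInnerA data col_idx end_row cs j 0 (g' + 1) = 0 := by
        simp only [pvInnerA]
        rw [if_pos hj, if_neg (by tauto)]
      rw [hin]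
      simp only [add_zero, Int.toNat_zero, List.replicate_zero, List.nil_append]
      have hfa : (end_row + 1 - j).toNat = g' + 1 := by omega
      rw [hfa, pvOuterA_unfold data col_idx end_row j g' hj (by omega)]
      simp [List.append_assoc]

theorem pvEquiv (data : List (List String)) (col_idx start_row end_row : Int) :
    calculate_rowspans data col_idx start_row end_row = calculate_rowspans_alt data col_idx start_row end_row := by
  unfold calculate_rowspans calculate_rowspans_alt
  by_cases hs : start_row ≤ end_row
  · have hlt : start_row < end_row + 1 := by omega
    rw [PySem.List.pyRange_one_cons hlt]
    simp only [List.foldl_cons]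
    have hstep : pvStepB data col_idx ([], -1, "") start_row
        = (([] : List Int) ++ [1], ((0 : Nat) : Int), pvCellStr data col_idx start_row) := by
      simp [pvStepB]
    rw [hstep]
    rw [show ((0:Nat) : Int) = ((List.length ([] : List Int) : Nat) : Int) by simp]
    rw [pvMain data col_idx end_row (end_row - start_row).toNat (start_row + 1) []
          1 [] (pvCellStr data col_idx start_row) (by omega)]
    have hfuel : (end_row + 1 - start_row).toNat = (end_row - start_row).toNat + 1 := by omega
    rw [hfuel, pvOuterA_unfold data col_idx end_row start_row (end_row - start_row).toNat hs rfl]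
    simp
  · have h0 : (end_row + 1 - start_row).toNat = 0 := by omega
    rw [h0, PySem.List.pyRange_one_eq_nil (by omega)]
    simp [pvOuterA]

-- ===== VERDICT (by name: the statement is the Claim_ definition above) =====
theorem calculate_rowspans_spec : Claim_equal_calculate_rowspans := by
  intro data col_idx start_row end_row _ _
  unfold Spec_calculate_rowspans
  exact pvEquiv data col_idx start_row end_row
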